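-- pv_equiv track=rewrite | github.com/vonvic/Advent-of-Code-2015-Python | 03/solution.py | __simulate_moves_with_robo_santa
-- ===== SOURCE A (Python) =====
-- from collections import namedtuple
-- from typing import Set
--
-- Coordinate = namedtuple("Coordinate", "x y")
--
-- def __simulate_moves_with_robo_santa(moves: str) -> int:
--     """
--     Simulate the sequence of moves in `moves` with two movers.
--
--     The movers will alternate moves, each recording their own current position
--     for each move the make.
--     Here is what each move does:
--         ^ - north
--         > - east
--         v - south
--         < - west
--
--     Return the number of unique positions among both movers.
--     """
--     current_position = Coordinate(0, 0)
--     other_position = Coordinate(0, 0)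
--
--     positions_visited: Set[Coordinate] = {current_position, other_position}
--
--     for move in moves:
--         x, y = current_position
--         match move:
--             case "^":
--                 y += 1
--             case ">":
--                 x += 1
--             case "v":
--                 y -= 1
--             case "<":
--                 x -= 1
--         new_position = Coordinate(x, y)
--         positions_visited.add(new_position)
--         current_position = other_position
--         other_position = new_position
--     return len(positions_visited)
-- ===== SOURCE B (Python) =====
-- from collections import namedtuple
-- from typing import Set
--
-- Coordinate = namedtuple("Coordinate", "x y")
--
-- _DELTA = {"^": (0, 1), ">": (1, 0), "v": (0, -1), "<": (-1, 0)}
--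
--
-- def _path(sub: str) -> Set[Coordinate]:
--     """Positions visited (after each move) by one mover walking from (0,0)."""
--     x = y = 0
--     pts: Set[Coordinate] = set()
--     for ch in sub:
--         dx, dy = _DELTA.get(ch, (0, 0))
--         x += dx
--         y += dy
--         pts.add(Coordinate(x, y))
--     return pts
--
--
-- def __simulate_moves_with_robo_santa(moves: str) -> int:
--     return len({Coordinate(0, 0)} | _path(moves[0::2]) | _path(moves[1::2]))
-- ===== Notes on version B (the rewrite author's own statement) =====
-- stated objective: idiomatic
-- what changed: Instead of simulating the two movers by swapping state every turn, B splits the move string by index parity (moves[0::2]/moves[1::2]), walks each mover independently with a delta table, and returns the size of the union of their visited sets with the origin.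
import Mathlib
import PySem

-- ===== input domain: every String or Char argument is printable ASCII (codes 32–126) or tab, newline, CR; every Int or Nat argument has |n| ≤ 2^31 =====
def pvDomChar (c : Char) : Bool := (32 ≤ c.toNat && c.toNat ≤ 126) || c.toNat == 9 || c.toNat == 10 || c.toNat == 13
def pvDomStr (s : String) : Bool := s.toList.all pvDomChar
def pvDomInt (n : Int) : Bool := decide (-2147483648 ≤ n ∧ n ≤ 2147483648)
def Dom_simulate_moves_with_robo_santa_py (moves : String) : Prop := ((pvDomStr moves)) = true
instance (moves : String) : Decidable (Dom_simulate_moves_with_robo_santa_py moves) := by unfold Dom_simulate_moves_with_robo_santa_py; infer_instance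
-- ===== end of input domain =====

-- B replaces A's per-turn state swap by walking the two movers independently over the
-- parity slices moves[0::2] / moves[1::2] and taking the union of their visited sets (same cost; idiomatic decomposition).

-- ===== PORT A =====
-- loop body of A's 'for move in moves' (state: current_position, other_position, positions_visited)
def pvLoopA (st : (Int × Int) × (Int × Int) × PySem.Set (Int × Int)) (move : Char) :
    (Int × Int) × (Int × Int) × PySem.Set (Int × Int) :=
  let current_position := st.1
  let other_position := st.2.1
  let positions_visited := st.2.2
  let x := current_position.1
  let y := current_position.2
  let xy : Int × Int :=
    if move = '^' then (x, y + 1)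
    else if move = '>' then (x + 1, y)
    else if move = 'v' then (x, y - 1)
    else if move = '<' then (x - 1, y)
    else (x, y)
  let new_position := xy
  (other_position, new_position, PySem.Set.add positions_visited new_position)

def simulate_moves_with_robo_santa_py (moves : String) : Int :=
  let current_position : Int × Int := (0, 0)
  let other_position : Int × Int := (0, 0)
  let positions_visited : PySem.Set (Int × Int) :=
    PySem.Set.add (PySem.Set.add PySem.Set.empty current_position) other_position
  let final := moves.toList.foldl pvLoopA (current_position, other_position, positions_visited)
  PySem.Set.len final.2.2

-- ===== PORT B =====
def pvDelta : PySem.Dict Char (Int × Int) :=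
  PySem.Dict.ofList [('^', (0, 1)), ('>', (1, 0)), ('v', (0, -1)), ('<', (-1, 0))]

-- loop body of B's '_path' (state: x, y, pts)
def pvPathStep (st : Int × Int × PySem.Set (Int × Int)) (ch : Char) :
    Int × Int × PySem.Set (Int × Int) :=
  let d := PySem.Dict.getD pvDelta ch (0, 0)
  let x := st.1 + d.1
  let y := st.2.1 + d.2
  (x, y, PySem.Set.add st.2.2 (x, y))

def pvPath (sub : List Char) : PySem.Set (Int × Int) :=
  (sub.foldl pvPathStep (0, 0, PySem.Set.empty)).2.2

def simulate_moves_with_robo_santa_py_alt (moves : String) : Int :=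
  let ml := moves.toList
  let santa := (PySem.List.slice? ml (some 0) none 2).getD []    -- moves[0::2]
  let robo := (PySem.List.slice? ml (some 1) none 2).getD []     -- moves[1::2]
  PySem.Set.len
    (PySem.Set.union
      (PySem.Set.union (PySem.Set.add PySem.Set.empty ((0 : Int), (0 : Int))) (pvPath santa))
      (pvPath robo))

-- ===== PRECONDITION & SPEC =====
def Spec_simulate_moves_with_robo_santa_py (moves : String) (out : Int) : Prop := out = simulate_moves_with_robo_santa_py_alt moves
instance (moves : String) (out : Int) : Decidable (Spec_simulate_moves_with_robo_santa_py moves out) := by unfold Spec_simulate_moves_with_robo_santa_py; infer_instance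

-- ===== CLAIM (what is proved, stated in full; the proofs are below) =====
def Claim_equal_simulate_moves_with_robo_santa_py : Prop := ∀ (moves : String), Dom_simulate_moves_with_robo_santa_py moves → Spec_simulate_moves_with_robo_santa_py moves (simulate_moves_with_robo_santa_py moves)

-- ===== LEMMAS AND PROOFS =====

-- the common one-move position update
def pvStep (p : Int × Int) (move : Char) : Int × Int :=
  if move = '^' then (p.1, p.2 + 1)
  else if move = '>' then (p.1 + 1, p.2)
  else if move = 'v' then (p.1, p.2 - 1)
  else if move = '<' then (p.1 - 1, p.2)
  else p

-- the positions recorded by a mover starting at p over sub (one per character)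
def pvPos (p : Int × Int) : List Char → List (Int × Int)
  | [] => []
  | ch :: t => pvStep p ch :: pvPos (pvStep p ch) t

-- elements at even indices
def pvEvens {α : Type} : List α → List α
  | [] => []
  | a :: l => a :: pvEvens l.tail
termination_by l => l.length
decreasing_by simp

theorem pvEvens_nil {α : Type} : pvEvens ([] : List α) = [] := by rw [pvEvens]

theorem pvEvens_cons {α : Type} (a : α) (l : List α) :
    pvEvens (a :: l) = a :: pvEvens l.tail := by rw [pvEvens]

theorem pvDelta_getD (ch : Char) :
    PySem.Dict.getD pvDelta ch (0, 0) =
      (if ch = '^' then ((0 : Int), (1 : Int)) else if ch = '>' then (1, 0)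
       else if ch = 'v' then (0, -1) else if ch = '<' then (-1, 0) else (0, 0)) := by
  have h : pvDelta =
      PySem.Dict.mk [('^', (0, 1)), ('>', (1, 0)), ('v', (0, -1)), ('<', (-1, 0))] := by decide
  rw [h]
  by_cases h1 : ch = '^'
  · subst h1; decide
  by_cases h2 : ch = '>'
  · subst h2; decide
  by_cases h3 : ch = 'v'
  · subst h3; decide
  by_cases h4 : ch = '<'
  · subst h4; decide
  simp only [PySem.Dict.getD, PySem.Dict.get?_mk_cons, beq_iff_eq, h1, h2, h3, h4,
    Ne.symm h1, Ne.symm h2, Ne.symm h3, Ne.symm h4, if_false]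
  simp [PySem.Dict.get?]

theorem pvLoopA_eq (c o : Int × Int) (S : PySem.Set (Int × Int)) (ch : Char) :
    pvLoopA (c, o, S) ch = (o, pvStep c ch, PySem.Set.add S (pvStep c ch)) := by
  simp [pvLoopA, pvStep]

theorem pvPathStep_eq (x y : Int) (S : PySem.Set (Int × Int)) (ch : Char) :
    pvPathStep (x, y, S) ch =
      ((pvStep (x, y) ch).1, (pvStep (x, y) ch).2, PySem.Set.add S (pvStep (x, y) ch)) := by
  simp only [pvPathStep, pvDelta_getD, pvStep]
  split_ifs <;> simp [sub_eq_add_neg]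

theorem pvPath_mem (l : List Char) (x y : Int) (S : PySem.Set (Int × Int)) (z : Int × Int) :
    z ∈ (l.foldl pvPathStep (x, y, S)).2.2 ↔ z ∈ S ∨ z ∈ pvPos (x, y) l := by
  induction l generalizing x y S with
  | nil => simp [pvPos]
  | cons ch t ih =>
    simp only [List.foldl_cons, pvPathStep_eq, pvPos, ih, PySem.Set.mem_add, List.mem_cons]
    tauto

theorem pvLoopA_mem (l : List Char) (c o : Int × Int) (S : PySem.Set (Int × Int)) (z : Int × Int) :
    z ∈ (l.foldl pvLoopA (c, o, S)).2.2 ↔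
      z ∈ S ∨ z ∈ pvPos c (pvEvens l) ∨ z ∈ pvPos o (pvEvens l.tail) := by
  induction l generalizing c o S with
  | nil => simp [pvEvens_nil, pvPos]
  | cons ch t ih =>
    simp only [List.foldl_cons, pvLoopA_eq, ih, PySem.Set.mem_add, List.tail_cons]
    rw [pvEvens_cons]
    simp only [pvPos, List.mem_cons]
    tauto

theorem pvLoopA_nodup (l : List Char) (c o : Int × Int) (S : PySem.Set (Int × Int))
    (hS : S.Nodup) : (l.foldl pvLoopA (c, o, S)).2.2.Nodup := by
  induction l generalizing c o S with
  | nil => exact hS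
  | cons ch t ih =>
    simp only [List.foldl_cons, pvLoopA_eq]
    exact ih _ _ _ (PySem.Set.nodup_add _ _ hS)

theorem pvEvens_core_aux {α : Type} (n : Nat) :
    ∀ (xs : List α), xs.length ≤ n →
      (List.range ((xs.length + 1) / 2)).filterMap (fun k => xs[2 * k]?) = pvEvens xs := by
  induction n with
  | zero =>
    intro xs h
    have : xs = [] := List.eq_nil_of_length_eq_zero (Nat.le_zero.mp h)
    subst this; simp [pvEvens_nil]
  | succ n ih =>
    intro xs h
    match xs with
    | [] => simp [pvEvens_nil]
    | a :: l =>
      have hc : (l.length + 1 + 1) / 2 = (l.tail.length + 1) / 2 + 1 := by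
        cases l <;> simp <;> omega
      rw [pvEvens_cons, List.length_cons, hc, List.range_succ_eq_map, List.filterMap_cons,
        List.filterMap_map]
      have hf : ((fun k => (a :: l)[2 * k]?) ∘ Nat.succ) = fun k => l.tail[2 * k]? := by
        funext k
        show (a :: l)[2 * (k + 1)]? = l.tail[2 * k]?
        rw [List.getElem?_tail]
        rw [show 2 * (k + 1) = (2 * k + 1) + 1 by ring]
        simp
      rw [hf, ih l.tail (by simp at h ⊢; omega)]
      simp

theorem pvEvens_core {α : Type} (xs : List α) :
    (List.range ((xs.length + 1) / 2)).filterMap (fun k => xs[2 * k]?) = pvEvens xs :=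
  pvEvens_core_aux xs.length xs le_rfl

theorem pvSlice_evens {α : Type} (xs : List α) :
    (PySem.List.slice? xs (some 0) none 2).getD [] = pvEvens xs := by
  simp only [PySem.List.slice?, PySem.List.sliceIndices]
  norm_num
  rcases xs with _ | ⟨a, l⟩
  · simp [pvEvens_nil]
  · have hpos : 0 < (a :: l).length := by simp
    rw [if_pos hpos]
    have hcount : ((((a :: l).length : Int) + 2 - 1) / 2).toNat = ((a :: l).length + 1) / 2 := by
      omega
    rw [hcount]
    have hfun : (fun x : Nat => (a :: l)[(2 * (x : Int)).toNat]?) =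
        fun k : Nat => (a :: l)[2 * k]? := by
      funext k
      have h2 : (2 * (k : Int)).toNat = 2 * k := by omega
      rw [h2]
    rw [hfun, pvEvens_core]

theorem pvSlice_odds {α : Type} (xs : List α) :
    (PySem.List.slice? xs (some 1) none 2).getD [] = pvEvens xs.tail := by
  simp only [PySem.List.slice?, PySem.List.sliceIndices]
  norm_num
  rcases xs with _ | ⟨a, l⟩
  · simp [pvEvens_nil]
  · have hmin : min (1 : Int) (((a :: l).length : Int)) = 1 := by
      simp only [List.length_cons]; omega
    simp only [hmin]
    have hcount : (if 1 < (a :: l).length then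
        ((((a :: l).length : Int) - 1 + 2 - 1) / 2).toNat else 0) = (l.length + 1) / 2 := by
      simp only [List.length_cons]; split_ifs <;> omega
    rw [hcount]
    have hfun : (fun x : Nat => (a :: l)[((1 : Int) + 2 * (x : Int)).toNat]?) =
        fun k : Nat => l[2 * k]? := by
      funext k
      have h : ((1 : Int) + 2 * (k : Int)).toNat = 2 * k + 1 := by omega
      rw [h, List.getElem?_cons_succ]
    rw [hfun, List.tail_cons, pvEvens_core]

-- ===== VERDICT (by name: the statement is the Claim_ definition above) =====
theorem simulate_moves_with_robo_santa_py_spec : Claim_equal_simulate_moves_with_robo_santa_py := by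
  intro moves _
  unfold Spec_simulate_moves_with_robo_santa_py
  unfold simulate_moves_with_robo_santa_py simulate_moves_with_robo_santa_py_alt
  simp only [pvSlice_evens, pvSlice_odds, PySem.Set.len]
  congr 1
  apply List.Perm.length_eq
  rw [List.perm_ext_iff_of_nodup]
  · intro z
    rw [pvLoopA_mem]
    simp only [pvPath, PySem.Set.mem_union, pvPath_mem, PySem.Set.mem_add]
    simp [PySem.Set.empty]
    tauto
  · exact pvLoopA_nodup _ _ _ _ (by simp [PySem.Set.empty])
  · apply PySem.Set.nodup_union
    apply PySem.Set.nodup_union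
    simp [PySem.Set.empty]
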